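-- pv_equiv track=rewrite | github.com/christianebacani/Roadmap | Coding Challenges using Python and SQL/Code Wars Python Solved Problems/7 Kyu/white_or_black.py | square_color
-- ===== SOURCE A (Python) =====
-- def square_color(tile_name: str, tile_number: int) -> str:
--     tile_name_and_tiles = {
--         'a': [0, 1, 0, 1, 0, 1, 0, 1],
--         'b': [1, 0, 1, 0, 1 , 0, 1, 0],
--         'c': [0, 1, 0, 1, 0, 1, 0, 1],
--         'd': [1, 0, 1, 0, 1 , 0, 1, 0],
--         'e': [0, 1, 0, 1, 0, 1, 0, 1],
--         'f': [1, 0, 1, 0, 1 , 0, 1, 0],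
--         'g': [0, 1, 0, 1, 0, 1, 0, 1],
--         'h': [1, 0, 1, 0, 1 , 0, 1, 0]
--     }
--
--     for key, value in tile_name_and_tiles.items():
--         if tile_name != key:
--             continue
--
--         for index, tiles in enumerate(value):
--             index += 1
--
--             if tile_number != index:
--                 continue
--
--             if tiles == 1:
--                 return 'white'
--
--             else:
--                 return 'black'
-- ===== SOURCE B (Python) =====
-- def square_color(tile_name: str, tile_number: int) -> str:
--     if tile_name in {'a', 'b', 'c', 'd', 'e', 'f', 'g', 'h'} and 1 <= tile_number <= 8:
--         col = ord(tile_name) - ord('a')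
--         return 'white' if (col + tile_number - 1) % 2 == 1 else 'black'
--     return None
-- ===== Notes on version B (the rewrite author's own statement) =====
-- stated objective: simpler
-- what changed: Replaces the dict-of-lists with nested loops by a set-membership check plus a closed-form parity formula on the column letter and row number.
import Mathlib
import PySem

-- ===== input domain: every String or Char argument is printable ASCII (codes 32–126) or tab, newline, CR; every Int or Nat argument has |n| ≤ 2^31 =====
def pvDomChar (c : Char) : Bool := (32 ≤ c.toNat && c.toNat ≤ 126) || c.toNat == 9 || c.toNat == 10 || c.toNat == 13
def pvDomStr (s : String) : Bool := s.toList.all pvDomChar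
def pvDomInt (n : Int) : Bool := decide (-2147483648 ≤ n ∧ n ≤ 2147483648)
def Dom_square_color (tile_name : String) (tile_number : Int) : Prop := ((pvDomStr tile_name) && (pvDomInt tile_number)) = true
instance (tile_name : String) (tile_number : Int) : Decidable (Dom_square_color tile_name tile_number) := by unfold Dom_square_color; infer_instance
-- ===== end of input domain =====

-- B replaces A's dict-of-lists table scan by a membership guard plus a parity formula (objective: simpler).

-- ===== PORT A =====
-- the dict literal, as an association list in insertion order
def sqTable : List (String × List Int) :=
  [("a", [0, 1, 0, 1, 0, 1, 0, 1]),
   ("b", [1, 0, 1, 0, 1, 0, 1, 0]),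
   ("c", [0, 1, 0, 1, 0, 1, 0, 1]),
   ("d", [1, 0, 1, 0, 1, 0, 1, 0]),
   ("e", [0, 1, 0, 1, 0, 1, 0, 1]),
   ("f", [1, 0, 1, 0, 1, 0, 1, 0]),
   ("g", [0, 1, 0, 1, 0, 1, 0, 1]),
   ("h", [1, 0, 1, 0, 1, 0, 1, 0])]

-- inner 'for index, tiles in enumerate(value)' loop; idx is the running enumerate index
def sqInner (tile_number : Int) (idx : Int) : List Int → Option String
  | [] => none
  | tiles :: rest =>
    if tile_number ≠ idx + 1 then sqInner tile_number (idx + 1) rest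
    else if tiles = 1 then some "white" else some "black"

-- outer 'for key, value in ….items()' loop; falling off the inner loop continues the outer one
def sqOuter (tile_name : String) (tile_number : Int) : List (String × List Int) → Option String
  | [] => none
  | (key, value) :: rest =>
    if tile_name ≠ key then sqOuter tile_name tile_number rest
    else match sqInner tile_number 0 value with
      | some r => some r
      | none => sqOuter tile_name tile_number rest

def square_color (tile_name : String) (tile_number : Int) : Option String :=
  sqOuter tile_name tile_number sqTable

-- ===== PORT B =====
-- ord(tile_name) on the (guaranteed single) character; guard mirrors Source B's set membership
def square_color_alt (tile_name : String) (tile_number : Int) : Option String :=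
  if tile_name ∈ ["a", "b", "c", "d", "e", "f", "g", "h"] ∧ 1 ≤ tile_number ∧ tile_number ≤ 8 then
    let col : Int := (tile_name.toList.headD ' ').toNat - 97
    if (col + tile_number - 1) % 2 = 1 then some "white" else some "black"
  else none

-- ===== PRECONDITION & SPEC =====
def Spec_square_color (tile_name : String) (tile_number : Int) (out : Option String) : Prop := out = square_color_alt tile_name tile_number
instance (tile_name : String) (tile_number : Int) (out : Option String) : Decidable (Spec_square_color tile_name tile_number out) := by unfold Spec_square_color; infer_instance

-- ===== CLAIM (what is proved, stated in full; the proofs are below) =====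
def Claim_equal_square_color : Prop := ∀ (tile_name : String) (tile_number : Int), Dom_square_color tile_name tile_number → Spec_square_color tile_name tile_number (square_color tile_name tile_number)

-- ===== LEMMAS AND PROOFS =====

-- out-of-range row number: the inner loop over any 8-element row finds nothing
theorem sqInner_none (n : Int) (v : List Int) (hv : v.length = 8) (h : n < 1 ∨ 8 < n) :
    sqInner n 0 v = none := by
  match v, hv with
  | [a1, a2, a3, a4, a5, a6, a7, a8], _ =>
    simp only [sqInner]
    split_ifs <;> first | rfl | omega

-- a name that matches no key: the outer loop finds nothing
theorem sqOuter_none (tn : String) (n : Int)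
    (h : tn ∉ ["a", "b", "c", "d", "e", "f", "g", "h"]) :
    square_color tn n = none := by
  simp only [List.mem_cons, List.not_mem_nil, or_false, not_or] at h
  obtain ⟨h1, h2, h3, h4, h5, h6, h7, h8⟩ := h
  simp [square_color, sqTable, sqOuter, h1, h2, h3, h4, h5, h6, h7, h8]

theorem square_color_eq (tn : String) (n : Int) : square_color tn n = square_color_alt tn n := by
  by_cases hm : tn ∈ ["a", "b", "c", "d", "e", "f", "g", "h"]
  · by_cases hr : 1 ≤ n ∧ n ≤ 8
    · have hn : n = 1 ∨ n = 2 ∨ n = 3 ∨ n = 4 ∨ n = 5 ∨ n = 6 ∨ n = 7 ∨ n = 8 := by omega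
      fin_cases hm <;> rcases hn with h | h | h | h | h | h | h | h <;> subst h <;> decide
    · have h : n < 1 ∨ 8 < n := by omega
      have hB : square_color_alt tn n = none := by
        unfold square_color_alt
        split_ifs with hc
        · exact absurd ⟨hc.2.1, hc.2.2⟩ hr
        · rfl
      rw [hB]
      fin_cases hm <;>
        simp [square_color, sqTable, sqOuter,
          sqInner_none n [0, 1, 0, 1, 0, 1, 0, 1] rfl h,
          sqInner_none n [1, 0, 1, 0, 1, 0, 1, 0] rfl h]
  · rw [sqOuter_none tn n hm]
    simp [square_color_alt, hm]

-- ===== VERDICT (by name: the statement is the Claim_ definition above) =====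
theorem square_color_spec : Claim_equal_square_color := by
  intro tn n _
  exact square_color_eq tn n
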